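-- pv_equiv track=rewrite | github.com/together2329/brian_hw | common_ai_agent/core/agent_runner.py | _dedup_intra_line
-- ===== SOURCE A (Python) =====
-- def _dedup_intra_line(text):
--     """Remove repeated content within each line of text.
--     Scans for any 50-char segment that appears twice — truncates before the second occurrence."""
--     cleaned = []
--     for line in text.split('\n'):
--         if len(line) > 100:
--             check_len = 50
--             limit = min(len(line) // 2, 600)
--             for i in range(0, limit):
--                 segment = line[i:i + check_len]
--                 if len(segment) < check_len:
--                     break
--                 second = line.find(segment, i + check_len)
--                 if second > i:
--                     line = line[:second].rstrip()
--                     break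
--         cleaned.append(line)
--     return '\n'.join(cleaned)
-- ===== SOURCE B (Python) =====
-- def _dedup_intra_line(text):
--     """Remove repeated content within each line of text.
--
--     One pass per line: remember the first position of every 50-char window in a
--     dict; the first window seen again 50+ chars after its first occurrence (with
--     that first occurrence below the scan limit) gives the truncation point."""
--     cleaned = []
--     for line in text.split('\n'):
--         if len(line) > 100:
--             limit = min(len(line) // 2, 600)
--             first = {}
--             best = None  # (first occurrence, second occurrence)
--             for p in range(0, len(line) - 49):
--                 w = line[p:p + 50]
--                 q = first.get(w)
--                 if q is None:
--                     first[w] = p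
--                 elif q + 50 <= p and q < limit and (best is None or q < best[0]):
--                     best = (q, p)
--             if best is not None:
--                 line = line[:best[1]].rstrip()
--         cleaned.append(line)
--     return '\n'.join(cleaned)
-- ===== Notes on version B (the rewrite author's own statement) =====
-- stated objective: alternative
-- what changed: Instead of calling str.find up to 600 times per long line (each a fresh scan of the line), B makes a single left-to-right pass per line that records the first position of every 50-char window in a dict and keeps the best (smallest first occurrence, then smallest second occurrence) repeated window, which is exactly the truncation point A computes.
import Mathlib
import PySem

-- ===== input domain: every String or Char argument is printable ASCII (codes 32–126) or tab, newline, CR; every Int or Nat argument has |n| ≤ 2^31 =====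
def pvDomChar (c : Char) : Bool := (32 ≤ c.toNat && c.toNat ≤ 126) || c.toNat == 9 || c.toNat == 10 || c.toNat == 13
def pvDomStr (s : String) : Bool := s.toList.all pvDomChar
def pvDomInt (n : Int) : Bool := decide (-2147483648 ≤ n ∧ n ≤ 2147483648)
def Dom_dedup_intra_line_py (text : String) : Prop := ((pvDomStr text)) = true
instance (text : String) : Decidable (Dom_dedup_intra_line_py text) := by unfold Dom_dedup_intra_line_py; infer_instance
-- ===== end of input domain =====

-- ===== PORT A =====
-- B replaces A's per-i `str.find` scans by a single per-line pass that maps each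
-- 50-char window to its first position in a dict (alternative algorithm, same result).

-- Python: the inner `for i in range(0, limit)` loop with its breaks
def pvLoopA (line : List Char) (r : List Int) : List Char :=
  match r with
  | [] => line
  | i :: rest =>
    let segment := PySem.List.slice line (some i) (some (i + 50))
    if PySem.List.len segment < 50 then line
    else
      let second := PySem.Chars.findFrom line segment (i + 50) none
      if i < second then PySem.Chars.rstrip (PySem.List.slice line none (some second))
      else pvLoopA line rest

-- Python: the body of the `for line in text.split('\n')` loop
def pvLineA (line : List Char) : List Char :=
  if 100 < PySem.List.len line then
    pvLoopA line (PySem.List.pyRange 0 (min (PySem.Int.floordiv (PySem.List.len line) 2) 600) 1)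
  else line

def dedup_intra_line_py (text : String) : String :=
  String.ofList (PySem.Chars.join ['\n'] ((PySem.Chars.splitOn text.toList ['\n']).map pvLineA))

-- ===== PORT B =====
-- Source B: the `for p in range(0, len(line) - 49)` pass maintaining `first` and `best`
def pvLoopB (line : List Char) (limit : Int) (first : PySem.Dict (List Char) Int)
    (best : Option (Int × Int)) (r : List Int) : Option (Int × Int) :=
  match r with
  | [] => best
  | p :: rest =>
    let w := PySem.List.slice line (some p) (some (p + 50))
    match first.get? w with
    | none => pvLoopB line limit (first.insert w p) best rest
    | some q =>
      if (decide (q + 50 ≤ p) && decide (q < limit) && best.all (fun b => decide (q < b.1))) then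
        pvLoopB line limit first (some (q, p)) rest
      else pvLoopB line limit first best rest

-- Source B: the body of the `for line in text.split('\n')` loop
def pvLineB (line : List Char) : List Char :=
  if 100 < PySem.List.len line then
    match pvLoopB line (min (PySem.Int.floordiv (PySem.List.len line) 2) 600) PySem.Dict.empty none
        (PySem.List.pyRange 0 (PySem.List.len line - 49) 1) with
    | some b => PySem.Chars.rstrip (PySem.List.slice line none (some b.2))
    | none => line
  else line

def dedup_intra_line_py_alt (text : String) : String :=
  String.ofList (PySem.Chars.join ['\n'] ((PySem.Chars.splitOn text.toList ['\n']).map pvLineB))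

-- ===== PRECONDITION & SPEC =====
def Spec_dedup_intra_line_py (text : String) (out : String) : Prop := out = dedup_intra_line_py_alt text
instance (text : String) (out : String) : Decidable (Spec_dedup_intra_line_py text out) := by unfold Spec_dedup_intra_line_py; infer_instance

-- ===== CLAIM (what is proved, stated in full; the proofs are below) =====
def Claim_equal_dedup_intra_line_py : Prop := ∀ (text : String), Dom_dedup_intra_line_py text → Spec_dedup_intra_line_py text (dedup_intra_line_py text)

-- ===== LEMMAS AND PROOFS =====

-- the 50-char window of `line` starting at position p
def pvWin (line : List Char) (p : Nat) : List Char := (line.drop p).take 50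

-- (q, j) is a "duplicate pair": window at q < L reappears at j, at distance ≥ 50, fully inside line
def pvCand (line : List Char) (L : Nat) (q j : Nat) : Prop :=
  q < L ∧ q + 50 ≤ j ∧ j + 50 ≤ line.length ∧ pvWin line q = pvWin line j

-- the pair both loops converge on: least q, then least j for that q (or none)
def pvIsBest (line : List Char) (L : Nat) : Option (Int × Int) → Prop
  | none => ∀ q j, ¬ pvCand line L q j
  | some b => ∃ q j : Nat, b = ((q : Int), (j : Int)) ∧ pvCand line L q j ∧
      (∀ q' j', pvCand line L q' j' → q ≤ q') ∧ (∀ j', pvCand line L q j' → j ≤ j')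

-- invariant for B's dict: first maps each window seen in [0, a) to its first position
def pvFirstInv (line : List Char) (a : Nat) (first : PySem.Dict (List Char) Int) : Prop :=
  ∀ w, match first.get? w with
  | none => ∀ r < a, pvWin line r ≠ w
  | some qi => ∃ q : Nat, qi = (q : Int) ∧ q < a ∧ pvWin line q = w ∧ ∀ r < q, pvWin line r ≠ w

-- invariant for B's best: the best pair among pairs whose second component is < a
def pvBestInv (line : List Char) (L a : Nat) : Option (Int × Int) → Prop
  | none => ∀ q j, j < a → ¬ pvCand line L q j
  | some b => ∃ q j : Nat, b = ((q : Int), (j : Int)) ∧ j < a ∧ pvCand line L q j ∧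
      (∀ q' j', j' < a → pvCand line L q' j' → q ≤ q') ∧ (∀ j', pvCand line L q j' → j ≤ j')

lemma pvWin_len {line : List Char} {a : Nat} (h : a + 50 ≤ line.length) :
    (pvWin line a).length = 50 := by
  simp [pvWin]; omega

lemma pvWin_prefix (line : List Char) (j : Nat) :
    pvWin line j <+: line.drop j := List.take_prefix _ _

lemma pvWin_of_prefix {line seg : List Char} {j : Nat} (hlen : seg.length = 50)
    (h : seg <+: line.drop j) : pvWin line j = seg ∧ j + 50 ≤ line.length := by
  constructor
  · rw [List.prefix_iff_eq_take] at h
    rw [pvWin, ← hlen, ← h]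
  · have := h.length_le
    simp [List.length_drop] at this
    omega

def pvRender (line : List Char) : Option (Int × Int) → List Char
  | none => line
  | some bb => PySem.Chars.rstrip (PySem.List.slice line none (some bb.2))

-- A's loop renders any pvIsBest option, provided no duplicate pair starts below a
lemma pvLoopA_renders (line : List Char) (L : Nat) (hn : 100 < line.length)
    (hL : L ≤ line.length / 2) (b : Option (Int × Int)) (hb : pvIsBest line L b) :
    ∀ a : Nat, (∀ q j, pvCand line L q j → a ≤ q) →
    pvLoopA line (PySem.List.pyRange (a : Int) (L : Int) 1) = pvRender line b := by
  have main : ∀ k a : Nat, L - a ≤ k → (∀ q j, pvCand line L q j → a ≤ q) →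
      pvLoopA line (PySem.List.pyRange (a : Int) (L : Int) 1) = pvRender line b := by
    intro k
    induction k with
    | zero =>
      intro a hk hlow
      rw [PySem.List.pyRange_one_eq_nil (by exact_mod_cast Nat.le_of_sub_eq_zero (Nat.le_zero.mp hk))]
      have hbnone : b = none := by
        cases b with
        | none => rfl
        | some bb =>
          exfalso
          obtain ⟨q, j, _, hc, _, _⟩ := hb
          exact absurd hc.1 (by have := hlow q j hc; omega)
      rw [hbnone]; rfl
    | succ k ih =>
      intro a hk hlow
      by_cases haL : L ≤ a
      · rw [PySem.List.pyRange_one_eq_nil (by exact_mod_cast haL)]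
        have hbnone : b = none := by
          cases b with
          | none => rfl
          | some bb =>
            exfalso
            obtain ⟨q, j, _, hc, _, _⟩ := hb
            exact absurd hc.1 (by have := hlow q j hc; omega)
        rw [hbnone]; rfl
      · have haL' : a < L := by omega
        have ha50 : a + 50 ≤ line.length := by omega
        rw [PySem.List.pyRange_one_cons (by exact_mod_cast haL')]
        rw [pvLoopA]
        have hcast : ((a : Int) + 50) = ((a + 50 : Nat) : Int) := by push_cast; ring
        rw [hcast, PySem.List.slice_natCast]
        have hseg : List.take (a + 50 - a) (List.drop a line) = pvWin line a := by
          simp [pvWin]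
        rw [hseg]
        have hlen50 : (pvWin line a).length = 50 := pvWin_len ha50
        rw [if_neg (by simp [PySem.List.len_eq, hlen50])]
        by_cases hsec : PySem.Chars.findFrom line (pvWin line a) ((a + 50 : Nat) : Int) none = -1
        · -- not found from a+50 on: no duplicate pair starts at a; recurse
          rw [hsec, if_neg (by omega)]
          have hnotin : ¬ pvWin line a <:+: List.drop (a + 50) line :=
            (PySem.Chars.findFrom_natCast_eq_neg_one_iff line (pvWin line a) (a + 50) ha50).mp hsec
          have hcast1 : ((a : Int) + 1) = ((a + 1 : Nat) : Int) := by push_cast; ring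
          rw [hcast1]
          refine ih (a + 1) (by omega) ?_
          intro q j hc
          rcases Nat.lt_or_ge q (a + 1) with h2 | h2
          · exfalso
            have hqa : q = a := by have := hlow q j hc; omega
            subst hqa
            obtain ⟨_, hqj, hj, hw⟩ := hc
            apply hnotin
            have hpre : pvWin line q <+: List.drop j line := by
              rw [hw]; exact pvWin_prefix _ _
            have hdd : List.drop j line = List.drop (j - (q + 50)) (List.drop (q + 50) line) := by
              rw [List.drop_drop]; congr 1; omega
            rw [hdd] at hpre
            exact hpre.isInfix.trans (List.drop_suffix _ _).isInfix
          · exact h2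
        · -- found: A stops here, and this is exactly the pvIsBest pair
          obtain ⟨hge, hpre, hmin⟩ :=
            PySem.Chars.findFrom_natCast_spec line (pvWin line a) (a + 50) ha50 hsec
          set second := PySem.Chars.findFrom line (pvWin line a) ((a + 50 : Nat) : Int) none with hsecdef
          have hsecpos : (0 : Int) ≤ second := le_trans (by positivity) hge
          rw [if_pos (by omega)]
          obtain ⟨hwj, hj50⟩ := pvWin_of_prefix hlen50 hpre
          have hcand : pvCand line L a second.toNat := ⟨haL', by omega, hj50, hwj.symm⟩
          have hbsome : b = some ((a : Int), second) := by
            cases b with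
            | none => exact absurd hcand (hb a second.toNat)
            | some bb =>
              obtain ⟨q, j, hbb, hc, hqmin, hjmin⟩ := hb
              have hqa : q = a := le_antisymm (hqmin a second.toNat hcand) (hlow q j hc)
              subst hqa
              have hj1 : j ≤ second.toNat := hjmin second.toNat hcand
              have hj2 : second.toNat ≤ j := by
                by_contra hlt
                obtain ⟨_, hcq, hcj, hcw⟩ := hc
                refine hmin j (by omega) (by omega) ?_
                have := pvWin_prefix line j
                rwa [← hcw] at this
              have hjj : ((j : Nat) : Int) = second := by
                rw [le_antisymm hj1 hj2, Int.toNat_of_nonneg hsecpos]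
              rw [hbb, hjj]
          rw [hbsome]; rfl
  exact fun a => main (L - a) a le_rfl

-- B's loop maintains the invariants
lemma pvLoopB_inv (line : List Char) (L : Nat) :
    ∀ a m : Nat, a ≤ m → m + 49 = line.length →
    ∀ first best, pvFirstInv line a first → pvBestInv line L a best →
    pvBestInv line L m (pvLoopB line (L : Int) first best (PySem.List.pyRange (a : Int) (m : Int) 1)) := by
  have main : ∀ k a m : Nat, m - a ≤ k → a ≤ m → m + 49 = line.length →
      ∀ first best, pvFirstInv line a first → pvBestInv line L a best →
      pvBestInv line L m (pvLoopB line (L : Int) first best (PySem.List.pyRange (a : Int) (m : Int) 1)) := by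
    intro k
    induction k with
    | zero =>
      intro a m hk ham hm first best hF hB
      have hma : m = a := by omega
      subst hma
      rw [PySem.List.pyRange_one_eq_nil le_rfl]
      exact hB
    | succ k ih =>
      intro a m hk ham hm first best hF hB
      by_cases ham' : m ≤ a
      · have hma : m = a := by omega
        subst hma
        rw [PySem.List.pyRange_one_eq_nil le_rfl]
        exact hB
      · have haM : a < m := by omega
        have ha50 : a + 50 ≤ line.length := by omega
        rw [PySem.List.pyRange_one_cons (by exact_mod_cast haM)]
        have hcast : ((a : Int) + 50) = ((a + 50 : Nat) : Int) := by push_cast; ring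
        have hcast1 : ((a : Int) + 1) = ((a + 1 : Nat) : Int) := by push_cast; ring
        have hseg : List.take (a + 50 - a) (List.drop a line) = pvWin line a := by
          simp [pvWin]
        -- no duplicate pair ends at a unless the window at a was seen ≥ 50 back
        cases hq : first.get? (pvWin line a) with
        | none =>
          have hstep : pvLoopB line (L : Int) first best
                ((a : Int) :: PySem.List.pyRange ((a : Int) + 1) (m : Int) 1)
              = pvLoopB line (L : Int) (first.insert (pvWin line a) (a : Int)) best
                (PySem.List.pyRange ((a : Int) + 1) (m : Int) 1) := by
            rw [pvLoopB]
            simp only [hcast, PySem.List.slice_natCast, hseg, hq]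
          rw [hstep]
          have hnone : ∀ r < a, pvWin line r ≠ pvWin line a := by
            have := hF (pvWin line a)
            rwa [hq] at this
          have hnocand : ∀ q', ¬ pvCand line L q' a := by
            intro q' hc
            obtain ⟨_, hq50, _, hw⟩ := hc
            exact hnone q' (by omega) hw
          rw [hcast1]
          refine ih (a + 1) m (by omega) (by omega) hm _ best ?_ ?_
          · -- dict invariant after inserting the fresh window
            intro w
            rw [PySem.Dict.get?_insert]
            by_cases hw : w = pvWin line a
            · subst hw
              rw [if_pos rfl]
              exact ⟨a, rfl, by omega, rfl, hnone⟩
            · rw [if_neg hw]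
              have := hF w
              cases hgw : first.get? w with
              | none =>
                rw [hgw] at this
                intro r hr
                rcases Nat.lt_or_ge r a with h | h
                · exact this r h
                · have : r = a := by omega
                  subst this
                  exact fun he => hw he.symm
              | some qi =>
                rw [hgw] at this
                obtain ⟨qr, h1, h2, h3, h4⟩ := this
                exact ⟨qr, h1, by omega, h3, h4⟩
          · -- best invariant carries over: no new pair
            cases best with
            | none =>
              intro q j hj hc
              rcases Nat.lt_or_ge j a with h | h
              · exact hB q j h hc
              · have : j = a := by omega
                subst this
                exact hnocand q hc
            | some bb =>
              obtain ⟨q0, j0, hbb, hj0, hc0, hqmin, hjmin⟩ := hB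
              refine ⟨q0, j0, hbb, by omega, hc0, ?_, hjmin⟩
              intro q' j' hj' hc'
              rcases Nat.lt_or_ge j' a with h | h
              · exact hqmin q' j' h hc'
              · have : j' = a := by omega
                subst this
                exact absurd hc' (hnocand q')
        | some qi =>
          have hsome := hF (pvWin line a)
          rw [hq] at hsome
          obtain ⟨qn, hqi, hqa, hqw, hqfirst⟩ := hsome
          subst hqi
          have hstep : pvLoopB line (L : Int) first best
                ((a : Int) :: PySem.List.pyRange ((a : Int) + 1) (m : Int) 1)
              = (if (decide (((qn : Nat) : Int) + 50 ≤ (a : Int)) && decide (((qn : Nat) : Int) < (L : Int)) &&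
                    Option.all (fun b => decide (((qn : Nat) : Int) < b.1)) best) = true
                 then pvLoopB line (L : Int) first (some (((qn : Nat) : Int), (a : Int)))
                        (PySem.List.pyRange ((a : Int) + 1) (m : Int) 1)
                 else pvLoopB line (L : Int) first best
                        (PySem.List.pyRange ((a : Int) + 1) (m : Int) 1)) := by
            rw [pvLoopB]
            simp only [hcast, PySem.List.slice_natCast, hseg, hq]
          rw [hstep]
          -- the first occurrence bounds any other occurrence before a
          have hF' : pvFirstInv line (a + 1) first := by
            intro w
            have hFw := hF w
            cases hgw : first.get? w with
            | none =>
              rw [hgw] at hFw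
              intro r hr
              rcases Nat.lt_or_ge r a with h | h
              · exact hFw r h
              · have : r = a := by omega
                subst this
                intro he
                rw [← he, hq] at hgw
                cases hgw
            | some qi' =>
              rw [hgw] at hFw
              obtain ⟨qr, h1, h2, h3, h4⟩ := hFw
              exact ⟨qr, h1, by omega, h3, h4⟩
          have hfirstle : ∀ q', q' < a → pvWin line q' = pvWin line a → qn ≤ q' := by
            intro q' _ hw'
            by_contra hlt
            exact hqfirst q' (by omega) hw'
          cases best with
          | none =>
            by_cases h1 : qn + 50 ≤ a ∧ qn < L
            · have hcond : (decide ((qn : Int) + 50 ≤ (a : Int)) && decide ((qn : Int) < (L : Int)) &&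
                  Option.all (fun b : Int × Int => decide ((qn : Int) < b.1)) (none : Option (Int × Int))) = true := by
                simp only [Option.all_none, Bool.and_true, Bool.and_eq_true, decide_eq_true_eq]
                constructor <;> [exact_mod_cast h1.1; exact_mod_cast h1.2]
              rw [if_pos hcond, hcast1]
              refine ih (a + 1) m (by omega) (by omega) hm first (some ((qn : Int), (a : Int))) hF' ?_
              have hcand : pvCand line L qn a := ⟨h1.2, h1.1, by omega, hqw⟩
              refine ⟨qn, a, rfl, by omega, hcand, ?_, ?_⟩
              · intro q' j' hj' hc'
                rcases Nat.lt_or_ge j' a with h | h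
                · exact absurd hc' (hB q' j' h)
                · have hja : j' = a := by omega
                  subst hja
                  obtain ⟨hcL, hc50, _, hcw⟩ := hc'
                  exact hfirstle q' (by omega) hcw
              · intro j' hc'
                by_contra hlt
                exact hB qn j' (by omega) hc'
            · have hcond : ¬ ((decide ((qn : Int) + 50 ≤ (a : Int)) && decide ((qn : Int) < (L : Int)) &&
                  Option.all (fun b : Int × Int => decide ((qn : Int) < b.1)) (none : Option (Int × Int))) = true) := by
                simp only [Option.all_none, Bool.and_true, Bool.and_eq_true, decide_eq_true_eq]
                intro hcc
                exact h1 ⟨by exact_mod_cast hcc.1, by exact_mod_cast hcc.2⟩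
              rw [if_neg hcond, hcast1]
              refine ih (a + 1) m (by omega) (by omega) hm first none hF' ?_
              intro q j hj hc
              rcases Nat.lt_or_ge j a with h | h
              · exact hB q j h hc
              · have : j = a := by omega
                subst this
                obtain ⟨hcL, hc50, _, hcw⟩ := hc
                have hle : qn ≤ q := hfirstle q (by omega) hcw
                exact h1 ⟨by omega, by omega⟩
          | some bb =>
            obtain ⟨q0, j0, hbb, hj0, hc0, hqmin, hjmin⟩ := hB
            subst hbb
            by_cases h1 : qn + 50 ≤ a ∧ qn < L ∧ qn < q0
            · have hcond : (decide ((qn : Int) + 50 ≤ (a : Int)) && decide ((qn : Int) < (L : Int)) &&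
                  Option.all (fun b => decide ((qn : Int) < b.1)) (some ((q0 : Int), (j0 : Int)))) = true := by
                simp only [Option.all_some, Bool.and_eq_true, decide_eq_true_eq]
                exact ⟨⟨by exact_mod_cast h1.1, by exact_mod_cast h1.2.1⟩, by exact_mod_cast h1.2.2⟩
              rw [if_pos hcond, hcast1]
              refine ih (a + 1) m (by omega) (by omega) hm first (some ((qn : Int), (a : Int))) hF' ?_
              have hcand : pvCand line L qn a := ⟨h1.2.1, h1.1, by omega, hqw⟩
              refine ⟨qn, a, rfl, by omega, hcand, ?_, ?_⟩
              · intro q' j' hj' hc'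
                rcases Nat.lt_or_ge j' a with h | h
                · have := hqmin q' j' h hc'
                  omega
                · have hja : j' = a := by omega
                  subst hja
                  obtain ⟨hcL, hc50, _, hcw⟩ := hc'
                  exact hfirstle q' (by omega) hcw
              · intro j' hc'
                by_contra hlt
                have := hqmin qn j' (by omega) hc'
                omega
            · have hcond : ¬ ((decide ((qn : Int) + 50 ≤ (a : Int)) && decide ((qn : Int) < (L : Int)) &&
                  Option.all (fun b => decide ((qn : Int) < b.1)) (some ((q0 : Int), (j0 : Int)))) = true) := by
                simp only [Option.all_some, Bool.and_eq_true, decide_eq_true_eq]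
                intro hcc
                exact h1 ⟨by exact_mod_cast hcc.1.1, by exact_mod_cast hcc.1.2, by exact_mod_cast hcc.2⟩
              rw [if_neg hcond, hcast1]
              refine ih (a + 1) m (by omega) (by omega) hm first (some ((q0 : Int), (j0 : Int))) hF' ?_
              refine ⟨q0, j0, rfl, by omega, hc0, ?_, hjmin⟩
              intro q' j' hj' hc'
              rcases Nat.lt_or_ge j' a with h | h
              · exact hqmin q' j' h hc'
              · have hja : j' = a := by omega
                subst hja
                obtain ⟨hcL2, hc502, _, hcw2⟩ := hc'
                have hle : qn ≤ q' := hfirstle q' (by omega) hcw2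
                have : ¬ (qn < q0) := fun hx => h1 ⟨by omega, by omega, hx⟩
                omega
  exact fun a m ham hm => main (m - a) a m le_rfl ham hm

lemma pvLine_eq (line : List Char) : pvLineA line = pvLineB line := by
  unfold pvLineA pvLineB
  by_cases hn : (100 : Int) < PySem.List.len line
  · rw [if_pos hn, if_pos hn]
    have hn' : 100 < line.length := by
      rw [PySem.List.len_eq] at hn
      exact_mod_cast hn
    have hlim : min (PySem.Int.floordiv (PySem.List.len line) 2) 600
        = ((min (line.length / 2) 600 : Nat) : Int) := by
      rw [PySem.List.len_eq]
      rw [show ((line.length : Int)) = ((line.length : Nat) : Int) from rfl,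
        show (2 : Int) = ((2 : Nat) : Int) from rfl, PySem.Int.floordiv_natCast]
      push_cast
      rfl
    rw [hlim]
    set L : Nat := min (line.length / 2) 600 with hLdef
    have hrange : PySem.List.len line - 49 = ((line.length - 49 : Nat) : Int) := by
      rw [PySem.List.len_eq]
      omega
    rw [hrange]
    have hF0 : pvFirstInv line 0 PySem.Dict.empty := by
      intro w
      rw [PySem.Dict.get?_empty]
      intro r hr
      omega
    have hB0 : pvBestInv line L 0 none := fun q j hj _ => absurd hj (by omega)
    have hble := pvLoopB_inv line L 0 (line.length - 49) (by omega) (by omega)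
      PySem.Dict.empty none hF0 hB0
    rw [Nat.cast_zero] at hble
    set bb := pvLoopB line (L : Int) PySem.Dict.empty none
      (PySem.List.pyRange 0 ((line.length - 49 : Nat) : Int) 1) with hbbdef
    have hisbest : pvIsBest line L bb := by
      cases hbv : bb with
      | none =>
        rw [hbv] at hble
        intro q j hc
        refine hble q j ?_ hc
        obtain ⟨_, _, hj, _⟩ := hc
        omega
      | some b2 =>
        rw [hbv] at hble
        obtain ⟨q, j, h1, _, hc, hqmin, hjmin⟩ := hble
        refine ⟨q, j, h1, hc, ?_, hjmin⟩
        intro q' j' hc'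
        refine hqmin q' j' ?_ hc'
        obtain ⟨_, _, hj', _⟩ := hc'
        omega
    have hA := pvLoopA_renders line L hn' (min_le_left _ _) bb hisbest 0
      (fun q j _ => Nat.zero_le q)
    rw [Nat.cast_zero] at hA
    rw [hA]
    clear_value bb
    cases bb with
    | none => rfl
    | some b2 => rfl
  · rw [if_neg hn, if_neg hn]

theorem pv_eq (text : String) : dedup_intra_line_py text = dedup_intra_line_py_alt text := by
  unfold dedup_intra_line_py dedup_intra_line_py_alt
  rw [funext pvLine_eq]

-- ===== VERDICT (by name: the statement is the Claim_ definition above) =====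
theorem dedup_intra_line_py_spec : Claim_equal_dedup_intra_line_py := by
  intro text _
  unfold Spec_dedup_intra_line_py
  exact pv_eq text
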